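-- pv_equiv track=rewrite | github.com/gukihuman/algorithms-python-hiryanov | Lecture_06_arrays/L06_task_F_chocolate.py | chocolate
-- ===== SOURCE A (Python) =====
-- def chocolate(height):
--     """
--     Counting the ways of dividing a chocolate with 3-framed width and
--     dynamic height. Divided parts are 2-framed. Symmetrical ways counts as
--     different. The height must be a positive even integer number. If it's not,
--     return 0.
--
--     :param height: an integer number, the height of the chocolate
--     :return: an integer number, the amount of dividing ways or 0
--     """
--
--     # Check the height. If it's not a positive even integer number, return 0.
--     if height % 2 != 0 or height <= 0:
--         return 0
--
--     # It's going to be a cycle, where the hight grows from the 2 to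
--     # 4, 6, 8, 10 etc. Sets a value of all previous ways' amounts,
--     # except the last one and the one before the last.
--     all_previous = 0
--
--     # Sets a value of the ways' amount before the last. 0 is subsidiary value
--     # for the start of the cycle.
--     before_last = 0
--
--     # Sets a value of the last ways' amount. 1 is subsidiary value for
--     # the start of the cycle.
--     last = 1
--
--     # Sets a value of the current ways' amount.
--     current = 0
--
--     # Starts the cycle, where the hight grows from the 2 to 4, 6, 8, 10 etc.,
--     # while the hight is not the one from the input.
--     for i in range(height//2):
--
--         # Calculate the current ways' amount.
--         current = last * 3 + before_last * 2 + all_previous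
--
--         # Add the part with the way's amount before the last to the memory
--         # of all previous ways' amount.
--         all_previous += before_last * 2
--
--         # Switches the last and before the last values.
--         before_last = last
--         last = current
--
--     # Return the final current value of the ways' amount of dividing
--     # the cocolate with the hight from the input.
--     return current
-- ===== SOURCE B (Python) =====
-- def chocolate(height):
--     # Same count via the order-2 recurrence f(n) = 4 f(n-1) - f(n-2)
--     # (f(1)=3, f(0)=1), computed by 2x2 matrix exponentiation.
--     if height % 2 != 0 or height <= 0:
--         return 0
--     n = height // 2
--     def mul(a, b):
--         return (a[0] * b[0] + a[1] * b[2], a[0] * b[1] + a[1] * b[3],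
--                 a[2] * b[0] + a[3] * b[2], a[2] * b[1] + a[3] * b[3])
--     r = (1, 0, 0, 1)
--     m = (4, -1, 1, 0)
--     e = n - 1
--     while e > 0:
--         if e % 2 == 1:
--             r = mul(r, m)
--         m = mul(m, m)
--         e //= 2
--     # (f(n), f(n-1)) = r . (3, 1)
--     return r[0] * 3 + r[1]
-- ===== Notes on version B (the rewrite author's own statement) =====
-- stated objective: alternative
-- what changed: Replaces A's iterative state-updating loop over height//2 iterations by binary exponentiation of the 2x2 matrix [[4,-1],[1,0]] of the order-2 linear recurrence f(n)=4f(n-1)-f(n-2) that A's loop computes.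
import Mathlib
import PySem

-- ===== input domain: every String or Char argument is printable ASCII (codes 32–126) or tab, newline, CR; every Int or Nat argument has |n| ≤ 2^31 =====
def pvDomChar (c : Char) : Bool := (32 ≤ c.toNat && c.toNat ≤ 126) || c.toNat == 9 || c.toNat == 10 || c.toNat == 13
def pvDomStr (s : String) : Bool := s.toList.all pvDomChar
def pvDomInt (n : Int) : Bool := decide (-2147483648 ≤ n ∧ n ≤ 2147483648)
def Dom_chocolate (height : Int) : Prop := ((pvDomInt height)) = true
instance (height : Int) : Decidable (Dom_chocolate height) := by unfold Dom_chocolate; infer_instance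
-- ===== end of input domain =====

-- B computes the count by binary exponentiation of the 2x2 matrix of the order-2
-- recurrence f(n) = 4 f(n-1) - f(n-2) that A's loop state satisfies, instead of A's loop.

-- ===== PORT A =====
-- one loop iteration of A: state = (all_previous, before_last, last, current)
def chocoStep (s : Int × Int × Int × Int) : Int × Int × Int × Int :=
  let c := s.2.2.1 * 3 + s.2.1 * 2 + s.1
  (s.1 + s.2.1 * 2, s.2.2.1, c, c)

def chocolate (height : Int) : Int :=
  if PySem.Int.mod height 2 ≠ 0 ∨ height ≤ 0 then 0
  else
    ((PySem.List.pyRange 0 (PySem.Int.floordiv height 2) 1).foldl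
      (fun s _ => chocoStep s) (0, 0, 1, 0)).2.2.2

-- ===== PORT B =====
-- 2x2 integer matrix (row-major) product, as in Source B's `mul`
def pvMul (a b : Int × Int × Int × Int) : Int × Int × Int × Int :=
  (a.1 * b.1 + a.2.1 * b.2.2.1, a.1 * b.2.1 + a.2.1 * b.2.2.2,
   a.2.2.1 * b.1 + a.2.2.2 * b.2.2.1, a.2.2.1 * b.2.1 + a.2.2.2 * b.2.2.2)

-- Source B's `while e > 0` binary-exponentiation loop (e ≥ 0 there, so e is a Nat here)
def pvPowLoop (r m : Int × Int × Int × Int) (e : Nat) : Int × Int × Int × Int :=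
  if h : e = 0 then r
  else pvPowLoop (if e % 2 = 1 then pvMul r m else r) (pvMul m m) (e / 2)
termination_by e
decreasing_by exact Nat.div_lt_self (Nat.pos_of_ne_zero h) (by omega)

def chocolate_alt (height : Int) : Int :=
  if PySem.Int.mod height 2 ≠ 0 ∨ height ≤ 0 then 0
  else
    let n := PySem.Int.floordiv height 2
    let r := pvPowLoop (1, 0, 0, 1) (4, -1, 1, 0) (n - 1).toNat
    r.1 * 3 + r.2.1

-- ===== PRECONDITION & SPEC =====
def Spec_chocolate (height : Int) (out : Int) : Prop := out = chocolate_alt height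
instance (height : Int) (out : Int) : Decidable (Spec_chocolate height out) := by unfold Spec_chocolate; infer_instance

-- ===== CLAIM (what is proved, stated in full; the proofs are below) =====
def Claim_equal_chocolate : Prop := ∀ (height : Int), Dom_chocolate height → Spec_chocolate height (chocolate height)

-- ===== LEMMAS AND PROOFS =====

-- f k = number of ways for height 2k (f 0, f 1 seed the recurrence)
def chocoF : Nat → Int
  | 0 => 1
  | 1 => 3
  | (k + 2) => 4 * chocoF (k + 1) - chocoF k

lemma foldl_const_iterate {α β : Type} (g : α → α) :
    ∀ (l : List β) (s : α), l.foldl (fun s _ => g s) s = g^[l.length] s := by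
  intro l
  induction l with
  | nil => intro s; rfl
  | cons x xs ih =>
      intro s
      simp [List.foldl_cons, ih, Function.iterate_succ_apply]

lemma chocoStep_iterate (k : Nat) :
    chocoStep^[k + 1] (0, 0, 1, 0) =
      (chocoF (k + 1) - 3 * chocoF k, chocoF k, chocoF (k + 1), chocoF (k + 1)) := by
  induction k with
  | zero => simp [chocoStep, chocoF]
  | succ k ih =>
      rw [Function.iterate_succ_apply', ih]
      simp only [chocoStep, chocoF]
      refine Prod.ext (by ring) (Prod.ext (by ring) (Prod.ext (by ring) (by ring)))

-- A's value on a valid input is chocoF of half the height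
lemma chocolate_eq_chocoF (height : Int)
    (hm : PySem.Int.mod height 2 = 0) (hp : 0 < height) (k : Nat)
    (hk : PySem.Int.floordiv height 2 = (k : Int) + 1) :
    chocolate height = chocoF (k + 1) := by
  unfold chocolate
  rw [if_neg (by push_neg; exact ⟨hm, by omega⟩)]
  rw [foldl_const_iterate]
  rw [hk]
  have hlen : (PySem.List.pyRange 0 ((k : Int) + 1) 1).length = k + 1 := by
    rw [PySem.List.length_pyRange_one]; omega
  rw [hlen, chocoStep_iterate]

def pvId : Int × Int × Int × Int := (1, 0, 0, 1)

-- naive matrix power, the specification of the binary loop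
def pvPowN (m : Int × Int × Int × Int) : Nat → Int × Int × Int × Int
  | 0 => pvId
  | (k + 1) => pvMul m (pvPowN m k)

lemma pvMul_assoc (a b c : Int × Int × Int × Int) :
    pvMul (pvMul a b) c = pvMul a (pvMul b c) := by
  simp only [pvMul]
  refine Prod.ext (by ring) (Prod.ext (by ring) (Prod.ext (by ring) (by ring)))

lemma pvMul_id_right (a : Int × Int × Int × Int) : pvMul a pvId = a := by
  simp [pvMul, pvId]

lemma pvMul_id_left (a : Int × Int × Int × Int) : pvMul pvId a = a := by
  simp [pvMul, pvId]

lemma pvPowN_sq (m : Int × Int × Int × Int) (k : Nat) :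
    pvPowN (pvMul m m) k = pvPowN m (2 * k) := by
  induction k with
  | zero => rfl
  | succ k ih =>
      have h2 : 2 * (k + 1) = (2 * k + 1) + 1 := by omega
      rw [h2]
      show pvMul (pvMul m m) (pvPowN (pvMul m m) k) = pvPowN m ((2 * k + 1) + 1)
      rw [ih]
      show pvMul (pvMul m m) (pvPowN m (2 * k)) = pvMul m (pvMul m (pvPowN m (2 * k)))
      rw [pvMul_assoc]

lemma pvPowLoop_eq (e : Nat) : ∀ (r m : Int × Int × Int × Int),
    pvPowLoop r m e = pvMul r (pvPowN m e) := by
  induction e using Nat.strong_induction_on with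
  | _ e ih =>
      intro r m
      by_cases h : e = 0
      · subst h
        rw [pvPowLoop]
        simp [pvMul_id_right, pvPowN]
      · rw [pvPowLoop]
        rw [dif_neg h]
        rw [ih (e / 2) (Nat.div_lt_self (Nat.pos_of_ne_zero h) (by omega))]
        rw [pvPowN_sq]
        by_cases ho : e % 2 = 1
        · rw [if_pos ho]
          have he : e = (2 * (e / 2)) + 1 := by omega
          rw [pvMul_assoc]
          congr 1
          conv_rhs => rw [he]
          rfl
        · rw [if_neg ho]
          have he : 2 * (e / 2) = e := by omega
          rw [he]

def pvM : Int × Int × Int × Int := (4, -1, 1, 0)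

lemma pvPowN_vec (k : Nat) :
    (pvPowN pvM k).1 * 3 + (pvPowN pvM k).2.1 = chocoF (k + 1) ∧
    (pvPowN pvM k).2.2.1 * 3 + (pvPowN pvM k).2.2.2 = chocoF k := by
  induction k with
  | zero => simp [pvPowN, pvId, chocoF]
  | succ k ih =>
      obtain ⟨h1, h2⟩ := ih
      constructor
      · show (pvMul pvM (pvPowN pvM k)).1 * 3 + (pvMul pvM (pvPowN pvM k)).2.1 = chocoF (k + 2)
        simp only [pvMul, pvM, chocoF] at h1 h2 ⊢
        linarith
      · show (pvMul pvM (pvPowN pvM k)).2.2.1 * 3 + (pvMul pvM (pvPowN pvM k)).2.2.2 = chocoF (k + 1)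
        simp only [pvMul, pvM] at h1 h2 ⊢
        linarith

lemma chocolate_alt_eq_chocoF (height : Int)
    (hm : PySem.Int.mod height 2 = 0) (hp : 0 < height) (k : Nat)
    (hk : PySem.Int.floordiv height 2 = (k : Int) + 1) :
    chocolate_alt height = chocoF (k + 1) := by
  unfold chocolate_alt
  rw [if_neg (by push_neg; exact ⟨hm, by omega⟩)]
  simp only [hk]
  have ht : ((k : Int) + 1 - 1).toNat = k := by omega
  rw [ht, pvPowLoop_eq]
  show (pvMul pvId (pvPowN pvM k)).1 * 3 + (pvMul pvId (pvPowN pvM k)).2.1 = chocoF (k + 1)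
  rw [pvMul_id_left]
  exact (pvPowN_vec k).1

-- ===== VERDICT (by name: the statement is the Claim_ definition above) =====
theorem chocolate_spec : Claim_equal_chocolate := by
  intro height _
  unfold Spec_chocolate
  by_cases hv : PySem.Int.mod height 2 = 0 ∧ 0 < height
  · obtain ⟨hm, hp⟩ := hv
    have hdvd : (2 : Int) ∣ height := (PySem.Int.mod_eq_zero_iff_dvd height 2).mp hm
    have hfd : PySem.Int.floordiv height 2 = height / 2 :=
      PySem.Int.floordiv_eq_ediv_of_pos (by omega)
    have hge : 1 ≤ height / 2 := by omega
    obtain ⟨c, hc⟩ := hdvd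
    have hk : PySem.Int.floordiv height 2 = ((height / 2 - 1).toNat : Int) + 1 := by omega
    rw [chocolate_eq_chocoF height hm hp _ hk,
        chocolate_alt_eq_chocoF height hm hp _ hk]
  · push_neg at hv
    unfold chocolate chocolate_alt
    by_cases hm : PySem.Int.mod height 2 = 0
    · have hp : height ≤ 0 := by have := hv hm; omega
      rw [if_pos (Or.inr hp), if_pos (Or.inr hp)]
    · rw [if_pos (Or.inl hm), if_pos (Or.inl hm)]
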